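-- pv_equiv track=rewrite | github.com/dbuddy25/pynastran-tools | postprocessing/modules/cbush_forces.py | _extract_comment_name
-- ===== SOURCE A (Python) =====
-- def _extract_comment_name(comment):
--     """Extract a descriptive name from a BDF card comment string.
--
--     Takes the last non-empty comment line (directly above the card).
--     Strips any prefix before a colon (e.g. ``$ Skin: Wing Upper``
--     becomes ``Wing Upper``).
--     """
--     if not comment:
--         return None
--     result = None
--     for line in comment.splitlines():
--         line = line.strip().lstrip('$').strip()
--         if line:
--             if ':' in line:
--                 line = line.split(':', 1)[1].strip()
--             if line:
--                 result = line
--     return result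
-- ===== SOURCE B (Python) =====
-- def _clean_line(line):
--     """Return the cleaned descriptive name of one comment line, or None."""
--     line = line.strip().lstrip('$').strip()
--     if not line:
--         return None
--     if ':' in line:
--         line = line.split(':', 1)[1].strip()
--     return line or None
--
--
-- def _extract_comment_name(comment):
--     if not comment:
--         return None
--     for line in reversed(comment.splitlines()):
--         name = _clean_line(line)
--         if name is not None:
--             return name
--     return None
-- ===== Notes on version B (the rewrite author's own statement) =====
-- stated objective: simpler
-- what changed: Replaces A's forward accumulate-last-match loop with a per-line cleaning helper and a reverse scan that returns the first qualifying line immediately.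
import Mathlib
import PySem

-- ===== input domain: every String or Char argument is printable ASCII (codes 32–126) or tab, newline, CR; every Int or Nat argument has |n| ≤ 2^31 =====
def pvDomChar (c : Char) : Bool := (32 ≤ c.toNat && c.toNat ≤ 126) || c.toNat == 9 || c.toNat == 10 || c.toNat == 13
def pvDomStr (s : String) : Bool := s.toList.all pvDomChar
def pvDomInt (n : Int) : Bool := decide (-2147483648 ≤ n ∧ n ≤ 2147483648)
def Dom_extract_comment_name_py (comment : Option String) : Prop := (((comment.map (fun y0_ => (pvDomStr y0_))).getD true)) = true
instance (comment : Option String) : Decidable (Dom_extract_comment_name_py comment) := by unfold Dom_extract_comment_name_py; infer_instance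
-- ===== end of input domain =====

-- B is simpler: a per-line cleaning helper plus a reverse scan returning the first
-- (= last in document order) qualifying line, instead of A's accumulate-last forward loop.

-- ===== PORT A =====
-- literal port of A; line.lstrip('$') is ported by hand as dropWhile (· == '$'),
-- which is exact since the chars argument is the single character '$'.
def extract_comment_name_py (comment : Option String) : Option String :=
  match comment with
  | none => none
  | some c =>
    if c = "" then none
    else
      (PySem.Str.splitlines c).foldl (fun result line =>
        let line := PySem.Str.strip (String.ofList ((PySem.Str.strip line).toList.dropWhile (fun ch => ch == '$')))
        if line ≠ "" then
          let line := if PySem.Str.isIn ":" line then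
              PySem.Str.strip (PySem.List.pyGetD ((PySem.Str.splitMax? line ":" 1).getD []) 1 "")
            else line
          if line ≠ "" then some line else result
        else result) none

-- ===== PORT B =====
-- port of Source B's _clean_line (same hand port of lstrip('$'))
def pvCleanLine (line : String) : Option String :=
  let line := PySem.Str.strip (String.ofList ((PySem.Str.strip line).toList.dropWhile (fun ch => ch == '$')))
  if line = "" then none
  else
    let line := if PySem.Str.isIn ":" line then
        PySem.Str.strip (PySem.List.pyGetD ((PySem.Str.splitMax? line ":" 1).getD []) 1 "")
      else line
    if line = "" then none else some line

-- Source B's 'for line in reversed(...): ... return name' loop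
def pvScanRev : List String → Option String
  | [] => none
  | l :: rest =>
    match pvCleanLine l with
    | some name => some name
    | none => pvScanRev rest

def extract_comment_name_py_alt (comment : Option String) : Option String :=
  match comment with
  | none => none
  | some c =>
    if c = "" then none
    else pvScanRev (PySem.Str.splitlines c).reverse

-- ===== PRECONDITION & SPEC =====
def Spec_extract_comment_name_py (comment : Option String) (out : Option String) : Prop := out = extract_comment_name_py_alt comment
instance (comment : Option String) (out : Option String) : Decidable (Spec_extract_comment_name_py comment out) := by unfold Spec_extract_comment_name_py; infer_instance

-- ===== CLAIM (what is proved, stated in full; the proofs are below) =====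
def Claim_equal_extract_comment_name_py : Prop := ∀ (comment : Option String), Dom_extract_comment_name_py comment → Spec_extract_comment_name_py comment (extract_comment_name_py comment)

-- ===== LEMMAS AND PROOFS =====

-- A's loop body equals 'take the cleaned line if any, else keep the accumulator'
theorem pv_stepA_eq (result : Option String) (line : String) :
    (let l := PySem.Str.strip (String.ofList ((PySem.Str.strip line).toList.dropWhile (fun ch => ch == '$')))
     if l ≠ "" then
       let l := if PySem.Str.isIn ":" l then
           PySem.Str.strip (PySem.List.pyGetD ((PySem.Str.splitMax? l ":" 1).getD []) 1 "")
         else l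
       if l ≠ "" then some l else result
     else result) = (pvCleanLine line).or result := by
  unfold pvCleanLine
  simp only []
  split_ifs <;> simp_all [Option.or]

theorem pv_scanRev_append (xs ys : List String) :
    pvScanRev (xs ++ ys) = (pvScanRev xs).or (pvScanRev ys) := by
  induction xs with
  | nil => simp [pvScanRev, Option.or]
  | cons l rest ih =>
    simp only [List.cons_append, pvScanRev, ih]
    cases pvCleanLine l <;> simp [Option.or]

theorem pv_foldl_or_eq_scanRev (ls : List String) (acc : Option String) :
    ls.foldl (fun result line => (pvCleanLine line).or result) acc = (pvScanRev ls.reverse).or acc := by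
  induction ls generalizing acc with
  | nil => simp [pvScanRev, Option.or]
  | cons l rest ih =>
    simp only [List.foldl_cons, ih, List.reverse_cons, pv_scanRev_append]
    cases h1 : pvScanRev rest.reverse <;>
      cases h2 : pvCleanLine l <;> simp [pvScanRev, Option.or, h2]

theorem pv_foldl_eq_scanRev (ls : List String) (acc : Option String) :
    ls.foldl (fun result line =>
        let line := PySem.Str.strip (String.ofList ((PySem.Str.strip line).toList.dropWhile (fun ch => ch == '$')))
        if line ≠ "" then
          let line := if PySem.Str.isIn ":" line then
              PySem.Str.strip (PySem.List.pyGetD ((PySem.Str.splitMax? line ":" 1).getD []) 1 "")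
            else line
          if line ≠ "" then some line else result
        else result) acc = (pvScanRev ls.reverse).or acc := by
  have hf : (fun (result : Option String) (line : String) =>
      let line := PySem.Str.strip (String.ofList ((PySem.Str.strip line).toList.dropWhile (fun ch => ch == '$')))
      if line ≠ "" then
        let line := if PySem.Str.isIn ":" line then
            PySem.Str.strip (PySem.List.pyGetD ((PySem.Str.splitMax? line ":" 1).getD []) 1 "")
          else line
        if line ≠ "" then some line else result
      else result) = (fun result line => (pvCleanLine line).or result) := by
    funext r l; exact pv_stepA_eq r l
  rw [hf, pv_foldl_or_eq_scanRev]

-- ===== VERDICT (by name: the statement is the Claim_ definition above) =====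
theorem extract_comment_name_py_spec : Claim_equal_extract_comment_name_py := by
  intro comment _
  unfold Spec_extract_comment_name_py extract_comment_name_py extract_comment_name_py_alt
  match comment with
  | none => rfl
  | some c =>
    by_cases hc : c = ""
    · simp [hc]
    · simp only [hc, if_false, pv_foldl_eq_scanRev, Option.or_none]
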